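-- pv_equiv track=rewrite | github.com/askap-craco/craco-python | src/craco/craco_candidate.py | _webpage_info_table
-- ===== SOURCE A (Python) =====
-- def _webpage_info_table(infolst, ncol=2):
--     """
--     create a `ncol` table to show information of the burst
--     """
--     header = '''<table class="info" style="margin-left: auto; margin-right: auto;">\n'''
--     body = ''
--     for i in range(0, len(infolst), ncol):
--         row = "<tr>\n"
--         for j in range(ncol):
--             if i + j >= len(infolst):
--                 row += '''<td><b></b></td> <td></td>\n'''
--             else:
--                 _key, _value = infolst[i+j]
--                 row += '''<td><b>{}</b></td> <td>{}</td>\n'''.format(_key, _value)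
--         row += "</tr>\n"
--         body += row
--     return f"{header}{body}</table>"
-- ===== SOURCE B (Python) =====
-- def _webpage_info_table(infolst, ncol=2):
--     """
--     create a `ncol` table to show information of the burst
--     """
--     header = '''<table class="info" style="margin-left: auto; margin-right: auto;">\n'''
--     # pad to a whole number of rows; an empty key/value pair renders exactly as A's empty cell
--     pad = (-len(infolst)) % ncol
--     padded = infolst + [('', '')] * pad
--     body = ''.join(
--         '<tr>\n'
--         + ''.join('''<td><b>{}</b></td> <td>{}</td>\n'''.format(k, v) for k, v in padded[i:i + ncol])
--         + '</tr>\n'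
--         for i in range(0, len(padded), ncol))
--     return f"{header}{body}</table>"
-- ===== Notes on version B (the rewrite author's own statement) =====
-- stated objective: simpler
-- what changed: Instead of an inner index loop with an in-bounds branch per cell, B pads the list with ('','') entries to a whole number of rows and emits every cell uniformly from fixed-size slices, joining the pieces.
-- outside the precondition, e.g. on _webpage_info_table([('a', '1')], 0): A raises ValueError, B raises ZeroDivisionError
import Mathlib
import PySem

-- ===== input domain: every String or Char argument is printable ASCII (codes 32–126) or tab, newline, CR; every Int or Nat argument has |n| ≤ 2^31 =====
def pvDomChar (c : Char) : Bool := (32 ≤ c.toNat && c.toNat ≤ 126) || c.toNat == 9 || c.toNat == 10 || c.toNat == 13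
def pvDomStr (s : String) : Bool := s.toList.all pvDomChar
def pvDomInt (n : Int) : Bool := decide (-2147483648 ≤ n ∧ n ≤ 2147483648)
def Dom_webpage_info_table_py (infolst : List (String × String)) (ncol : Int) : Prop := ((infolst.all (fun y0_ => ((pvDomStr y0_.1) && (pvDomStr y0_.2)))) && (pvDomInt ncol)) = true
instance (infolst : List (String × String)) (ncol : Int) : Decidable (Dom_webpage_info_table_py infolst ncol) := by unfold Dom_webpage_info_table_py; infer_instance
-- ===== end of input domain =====

-- B pads the list to a whole number of rows and emits every cell uniformly (no in-bounds branch): a simpler decomposition with the same output.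


-- ===== PORT A =====
def webpage_info_table_py (infolst : List (String × String)) (ncol : Int) : String :=
  let header := "<table class=\"info\" style=\"margin-left: auto; margin-right: auto;\">\n"
  let body := (PySem.List.pyRange 0 (infolst.length : Int) ncol).foldl (fun body i =>
    let row := (PySem.List.pyRange 0 ncol 1).foldl (fun row j =>
      if i + j ≥ (infolst.length : Int) then
        row ++ "<td><b></b></td> <td></td>\n"
      else
        match PySem.List.pyGet? infolst (i + j) with
        | some kv => row ++ "<td><b>" ++ kv.1 ++ "</b></td> <td>" ++ kv.2 ++ "</td>\n"
        | none => row  -- unreachable: the guard ensures 0 ≤ i + j < len(infolst)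
      ) "<tr>\n"
    body ++ (row ++ "</tr>\n")) ""
  header ++ body ++ "</table>"

-- ===== PORT B =====
-- '<td><b>{}</b></td> <td>{}</td>\n'.format(k, v)
def pvCell (kv : String × String) : String :=
  "<td><b>" ++ kv.1 ++ "</b></td> <td>" ++ kv.2 ++ "</td>\n"

def webpage_info_table_py_alt (infolst : List (String × String)) (ncol : Int) : String :=
  let header := "<table class=\"info\" style=\"margin-left: auto; margin-right: auto;\">\n"
  let pad := PySem.Int.mod (-(infolst.length : Int)) ncol
  let padded := infolst ++ List.replicate pad.toNat ("", "")
  let body := PySem.Str.join "" ((PySem.List.pyRange 0 (padded.length : Int) ncol).map (fun i =>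
    "<tr>\n" ++ PySem.Str.join "" ((PySem.List.slice padded (some i) (some (i + ncol))).map pvCell) ++ "</tr>\n"))
  header ++ body ++ "</table>"

-- ===== PRECONDITION & SPEC =====
-- Pre_ excludes exactly ncol = 0, where A raises ValueError (range() step 0) and B raises ZeroDivisionError (% by 0).
def Pre_webpage_info_table_py (infolst : List (String × String)) (ncol : Int) : Prop := ncol ≠ 0
instance (infolst : List (String × String)) (ncol : Int) : Decidable (Pre_webpage_info_table_py infolst ncol) := by unfold Pre_webpage_info_table_py; infer_instance
def pvWitness_webpage_info_table_py : (List (String × String)) × Int := ([("a", "1")], 2)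

def Spec_webpage_info_table_py (infolst : List (String × String)) (ncol : Int) (out : String) : Prop := out = webpage_info_table_py_alt infolst ncol
instance (infolst : List (String × String)) (ncol : Int) (out : String) : Decidable (Spec_webpage_info_table_py infolst ncol out) := by unfold Spec_webpage_info_table_py; infer_instance

-- ===== CLAIM (what is proved, stated in full; the proofs are below) =====
def Claim_equal_webpage_info_table_py : Prop := ∀ (infolst : List (String × String)) (ncol : Int), Dom_webpage_info_table_py infolst ncol → Pre_webpage_info_table_py infolst ncol → Spec_webpage_info_table_py infolst ncol (webpage_info_table_py infolst ncol)

-- ===== LEMMAS AND PROOFS =====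

-- joining on the empty separator is plain concatenation
def pvJoinL (L : List String) : String := String.ofList ((L.map String.toList).flatten)

theorem pv_flatten_intersperse {α : Type} (l : List (List α)) : (List.intersperse [] l).flatten = l.flatten := by
  induction l with
  | nil => rfl
  | cons x xs ih =>
    cases xs with
    | nil => rfl
    | cons y ys => simp_all [List.intersperse]

theorem pv_join_empty (L : List String) : PySem.Str.join "" L = pvJoinL L := by
  simp [PySem.Str.join, PySem.Chars.join, List.intercalate, pvJoinL, pv_flatten_intersperse]

theorem pvJoinL_nil : pvJoinL [] = "" := by simp [pvJoinL]

theorem pvJoinL_cons (s : String) (L : List String) : pvJoinL (s :: L) = s ++ pvJoinL L := by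
  simp [pvJoinL]

-- 'out += f(x)' over a list builds the concatenation of the pieces
theorem pv_foldl_str {α : Type} (l : List α) (f : α → String) (acc : String) :
    l.foldl (fun b x => b ++ f x) acc = acc ++ pvJoinL (l.map f) := by
  induction l generalizing acc with
  | nil => simp [pvJoinL_nil]
  | cons x xs ih => simp [ih, pvJoinL_cons, String.append_assoc]

-- arithmetic of the pad = (-n) % ncol
theorem pv_pad_nonneg (n ncol : Int) (hc : 0 < ncol) : 0 ≤ PySem.Int.mod (-n) ncol := by
  unfold PySem.Int.mod
  rw [Int.fmod_eq_emod]
  have := Int.emod_nonneg (-n) (by omega : ncol ≠ 0)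
  simp [hc.le]; omega

theorem pv_pad_lt (n ncol : Int) (hc : 0 < ncol) : PySem.Int.mod (-n) ncol < ncol := by
  unfold PySem.Int.mod
  rw [Int.fmod_eq_emod]
  have := Int.emod_lt_of_pos (-n) hc
  simp [hc.le]; omega

theorem pv_pad_dvd (n ncol : Int) (hc : 0 < ncol) : ncol ∣ (n + PySem.Int.mod (-n) ncol) := by
  unfold PySem.Int.mod
  rw [Int.fmod_eq_emod]
  simp [hc.le]
  have h := Int.emod_add_mul_ediv (-n) ncol
  exact ⟨-((-n) / ncol), by rw [mul_neg]; linarith [h]⟩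

theorem pv_pad_nonpos (n ncol : Int) (hc : ncol < 0) : PySem.Int.mod (-n) ncol ≤ 0 := by
  unfold PySem.Int.mod
  rw [Int.fmod_eq_emod]
  have h1 : 0 ≤ (-n) % ncol := Int.emod_nonneg (-n) (by omega)
  have h2 : (-n) % ncol < -ncol := by
    rw [← Int.emod_neg]; exact Int.emod_lt_of_pos (-n) (by omega)
  rcases em (ncol ∣ (-n)) with hd | hd
  · simp [hd, Int.emod_eq_zero_of_dvd hd]
  · simp [hd, not_le.mpr hc]; omega

-- range over the padded length enumerates the same row starts
theorem pv_range_pad (n ncol : Int) (hn : 0 ≤ n) (hc : 0 < ncol) :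
    PySem.List.pyRange 0 n ncol = PySem.List.pyRange 0 (n + PySem.Int.mod (-n) ncol) ncol := by
  set p := PySem.Int.mod (-n) ncol with hp
  have hp0 := pv_pad_nonneg n ncol hc
  have hp1 := pv_pad_lt n ncol hc
  obtain ⟨q, hq⟩ := pv_pad_dvd n ncol hc
  rw [PySem.List.pyRange_of_pos _ _ hc, PySem.List.pyRange_of_pos _ _ hc]
  congr 1
  rcases em (0 < n) with hpos | hzero
  · have hq0 : 0 < q := by nlinarith
    rw [if_pos (by omega), if_pos (by omega)]
    congr 1
    have e1 : n - 0 + ncol - 1 = (ncol - 1 - p) + ncol * q := by omega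
    have e2 : n + p - 0 + ncol - 1 = (ncol - 1) + ncol * q := by omega
    rw [e1, e2, Int.add_mul_ediv_left _ _ (by omega : ncol ≠ 0),
        Int.add_mul_ediv_left _ _ (by omega : ncol ≠ 0),
        Int.ediv_eq_zero_of_lt (by omega) (by omega),
        Int.ediv_eq_zero_of_lt (by omega) (by omega)]
  · have hn0 : n = 0 := by omega
    have hpz : p = 0 := by
      subst hn0
      simp [hp, PySem.Int.mod]
    rw [hn0, hpz]
    norm_num

theorem pv_range_neg (m ncol : Int) (hm : 0 ≤ m) (hc : ncol < 0) :
    PySem.List.pyRange 0 m ncol = [] := by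
  simp [PySem.List.pyRange]
  intro _
  rw [if_neg (by omega), if_neg (by omega)]

-- reading consecutive elements by index is a take of a drop
theorem pv_range_getD {α : Type} (xs : List α) (s c : Nat) (h : s + c ≤ xs.length) (d : α) :
    (List.range c).map (fun k => xs.getD (s + k) d) = (xs.drop s).take c := by
  apply List.ext_getElem
  · simp; omega
  · intro k h1 h2
    simp at h1
    simp [List.getElem?_eq_getElem (by omega : s + k < xs.length)]

-- one cell of A equals the uniform cell of B read from the padded list
theorem pv_cell_eq (infolst : List (String × String)) (p : Nat) (m : Int) (row : String)
    (h0 : 0 ≤ m) (hlt : m < (infolst.length : Int) + p) :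
    (if m ≥ (infolst.length : Int) then
        row ++ "<td><b></b></td> <td></td>\n"
      else
        match PySem.List.pyGet? infolst m with
        | some kv => row ++ "<td><b>" ++ kv.1 ++ "</b></td> <td>" ++ kv.2 ++ "</td>\n"
        | none => row)
    = row ++ pvCell ((infolst ++ List.replicate p ("", "")).getD m.toNat ("", "")) := by
  rcases em (m ≥ (infolst.length : Int)) with hge | hlt2
  · rw [if_pos hge,
        List.getD_append_right _ _ _ _ (by omega : infolst.length ≤ m.toNat),
        List.getD_replicate (x := ("", "")) (y := ("", "")) (by omega : m.toNat - infolst.length < p)]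
    have hcell : pvCell (("", "") : String × String) = "<td><b></b></td> <td></td>\n" := by decide
    rw [hcell]
  · rw [if_neg hlt2]
    have hm : m.toNat < infolst.length := by omega
    have : PySem.List.pyGet? infolst m = some infolst[m.toNat] := by
      simp [PySem.List.pyGet?, PySem.List.pyIdx?, h0, (by omega : m < (infolst.length : Int))]
    rw [this, List.getD_append _ _ _ _ hm, List.getD_eq_getElem _ _ hm]
    simp [pvCell, String.append_assoc]

-- one row of A equals one row of B
theorem pv_row_eq (infolst : List (String × String)) (ncol i : Int) (hc : 0 < ncol)
    (h0 : 0 ≤ i) (hin : i < (infolst.length : Int)) (hdvd : ncol ∣ i) :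
    (PySem.List.pyRange 0 ncol 1).foldl (fun row j =>
      if i + j ≥ (infolst.length : Int) then
        row ++ "<td><b></b></td> <td></td>\n"
      else
        match PySem.List.pyGet? infolst (i + j) with
        | some kv => row ++ "<td><b>" ++ kv.1 ++ "</b></td> <td>" ++ kv.2 ++ "</td>\n"
        | none => row) "<tr>\n"
    = "<tr>\n" ++ PySem.Str.join ""
        ((PySem.List.slice (infolst ++ List.replicate (PySem.Int.mod (-(infolst.length : Int)) ncol).toNat ("", ""))
          (some i) (some (i + ncol))).map pvCell) := by
  set n := (infolst.length : Int) with hn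
  set p := PySem.Int.mod (-n) ncol with hp
  set P := infolst ++ List.replicate p.toNat ("", "") with hP
  have hp0 := pv_pad_nonneg n ncol hc
  have hp1 := pv_pad_lt n ncol hc
  have hlenP : (P.length : Int) = n + p := by
    simp [hP, hn]; omega
  -- i + ncol ≤ n + p  (complete rows in the padded list)
  obtain ⟨q, hq⟩ := hdvd
  obtain ⟨r, hr⟩ := pv_pad_dvd n ncol hc
  have hrow : i + ncol ≤ n + p := by
    have hqr : q < r := by nlinarith
    have : ncol * (q + 1) ≤ ncol * r := by
      apply mul_le_mul_of_nonneg_left (by omega) hc.le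
    rw [hq, hr]; linarith
  -- replace A's guarded step by the uniform padded-cell step
  rw [PySem.List.foldl_congr_mem _ _
      (fun row j => row ++ pvCell (P.getD (i + j).toNat ("", ""))) _
      (by
        intro acc j hj
        rw [PySem.List.mem_pyRange_one] at hj
        exact pv_cell_eq infolst p.toNat (i + j) acc (by omega) (by omega))]
  rw [pv_foldl_str, pv_join_empty]
  congr 1
  -- the mapped indices are exactly the slice
  rw [PySem.List.slice_of_nonneg P (by omega) (by omega) (by omega) (by omega)]
  have hdiff : (i + ncol).toNat - i.toNat = ncol.toNat := by omega
  rw [hdiff, ← pv_range_getD P i.toNat ncol.toNat (by omega) ("", ""), List.map_map]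
  rw [PySem.List.pyRange_one, List.map_map]
  have hc0 : (ncol - 0).toNat = ncol.toNat := by omega
  rw [hc0]
  congr 1
  apply List.map_congr_left
  intro k hk
  simp only [Function.comp]
  congr 2
  omega

-- the main equivalence
theorem pv_main (infolst : List (String × String)) (ncol : Int) (hc : ncol ≠ 0) :
    webpage_info_table_py infolst ncol = webpage_info_table_py_alt infolst ncol := by
  simp only [webpage_info_table_py, webpage_info_table_py_alt]
  set n := (infolst.length : Int) with hn
  set p := PySem.Int.mod (-n) ncol with hp
  set P := infolst ++ List.replicate p.toNat ("", "") with hP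
  rcases lt_or_gt_of_ne hc with hneg | hpos
  · -- negative ncol: both bodies are empty
    have hpz : p.toNat = 0 := by
      have := pv_pad_nonpos n ncol hneg
      omega
    have hlenP : (P.length : Int) = n := by simp [hP, hpz, hn]
    rw [pv_range_neg n ncol (by positivity) hneg, hlenP,
        pv_range_neg n ncol (by positivity) hneg]
    simp [pv_join_empty, pvJoinL_nil]
  · -- positive ncol
    have hp0 := pv_pad_nonneg n ncol hpos
    have hlenP : (P.length : Int) = n + p := by simp [hP, hn]; omega
    rw [hlenP, ← pv_range_pad n ncol (by positivity) hpos]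
    congr 1
    -- rewrite every row, then flatten both folds
    rw [PySem.List.foldl_congr_mem _ _
        (fun body i =>
          body ++ (("<tr>\n" ++ PySem.Str.join "" ((PySem.List.slice P (some i) (some (i + ncol))).map pvCell)) ++ "</tr>\n")) _
        (by
          intro acc i hi
          rw [PySem.List.mem_pyRange_iff_of_pos hpos] at hi
          rw [pv_row_eq infolst ncol i hpos hi.1 hi.2.1 (by simpa using hi.2.2)])]
    rw [pv_foldl_str, pv_join_empty]
    simp [String.append_assoc]

-- ===== VERDICT (by name: the statement is the Claim_ definition above) =====
theorem webpage_info_table_py_spec : Claim_equal_webpage_info_table_py := by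
  intro infolst ncol _ hpre
  exact pv_main infolst ncol hpre
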